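-- pv_equiv track=rewrite | github.com/0sunzero0/ProblemSolving | Kakao/2022B_파괴되지 않은 건물.py | solution
-- ===== SOURCE A (Python) =====
-- def solution(board, skill):
--     N, M = len(board), len(board[0])
--
--     # skills 처리 배열
--     temp = [[0] * (M + 1) for _ in range(N + 1)]
--     for one_skill in skill:
--         type, r1, c1, r2, c2, degree = one_skill
--
--         if type == 1:
--             degree = -degree
--
--         temp[r1][c1] += degree
--         temp[r1][c2 + 1] -= degree
--         temp[r2 + 1][c1] -= degree
--         temp[r2 + 1][c2 + 1] += degree
--
--     # prefix sum 연산
--     # 1) 열마다 가로기준 prefix sum 연산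
--     for i in range(N):
--         for j in range(M):
--             temp[i][j + 1] += temp[i][j]
--     # 2) 행마다 세로기준 prefix sum 연산
--     for j in range(M):
--         for i in range(N):
--             temp[i + 1][j] += temp[i][j]
--
--     # 기존 배열에 연산 적용
--     answer = 0
--     for i in range(N):
--         for j in range(M):
--             board[i][j] += temp[i][j]
--             if board[i][j] >= 1:
--                 answer += 1
--     return answer
-- ===== SOURCE B (Python) =====
-- def solution(board, skill):
--     # Direct approach: apply each skill's delta to every cell of its rectangle,
--     # then count the surviving cells of the N x M grid.
--     # (Mutates board in place, like the original.)
--     N, M = len(board), len(board[0])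
--     for t, r1, c1, r2, c2, d in skill:
--         delta = -d if t == 1 else d
--         for i in range(r1, r2 + 1):
--             row = board[i]
--             for j in range(c1, c2 + 1):
--                 row[j] += delta
--     return sum(1 for i in range(N) for j in range(M) if board[i][j] >= 1)
-- ===== Notes on version B (the rewrite author's own statement) =====
-- stated objective: simpler
-- what changed: Replaces the 2D difference array and the two prefix-sum passes with direct per-cell rectangle updates followed by a plain count of surviving cells.
-- outside the precondition, e.g. on solution([[0, 0], [0, 0]], [[0, -1, 0, 0, 0, 1]]): A returns 0, B returns 2; on solution([[1, 1, 1]], [[0, 0, 2, 0, 0, 5]]): A returns 2, B returns 3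
import Mathlib
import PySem

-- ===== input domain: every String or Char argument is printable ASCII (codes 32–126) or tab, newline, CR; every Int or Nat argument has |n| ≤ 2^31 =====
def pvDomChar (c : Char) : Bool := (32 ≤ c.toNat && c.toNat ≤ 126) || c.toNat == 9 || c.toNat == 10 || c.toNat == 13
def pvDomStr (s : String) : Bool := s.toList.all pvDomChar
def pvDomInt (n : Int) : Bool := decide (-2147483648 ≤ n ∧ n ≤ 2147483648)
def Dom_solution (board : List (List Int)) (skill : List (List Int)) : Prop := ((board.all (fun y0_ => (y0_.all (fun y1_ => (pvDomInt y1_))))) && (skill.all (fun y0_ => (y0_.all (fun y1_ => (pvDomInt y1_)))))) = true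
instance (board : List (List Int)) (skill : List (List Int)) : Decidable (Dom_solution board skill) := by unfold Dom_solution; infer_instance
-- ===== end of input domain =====

-- B replaces A's 2D difference array + two prefix-sum passes by direct per-cell
-- rectangle updates and a plain count (simpler, not faster).  Both Pythons mutate
-- `board` in place identically on Pre_; the theorems below are about the RETURN value.

-- ===== PORT A =====
-- value of g[i][j]; under Pre_ every index used is non-negative and in range
def get2 (g : List (List Int)) (i j : Nat) : Int := (g.getD i []).getD j 0
-- g[i][j] += d (in-place element update; under Pre_ the index is always in range)
def bump2 (g : List (List Int)) (i j : Nat) (d : Int) : List (List Int) :=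
  g.modify i (fun row => row.modify j (· + d))

-- one iteration of A's skill loop (Python unpacking raises unless the row has 6
-- entries, and negative indices would wrap: both excluded by Pre_)
def applySkill (t : List (List Int)) (s : List Int) : List (List Int) :=
  match s with
  | [ty, r1, c1, r2, c2, dg] =>
    let dg := if ty = 1 then -dg else dg
    let t := bump2 t r1.toNat c1.toNat dg
    let t := bump2 t r1.toNat (c2 + 1).toNat (-dg)
    let t := bump2 t (r2 + 1).toNat c1.toNat (-dg)
    bump2 t (r2 + 1).toNat (c2 + 1).toNat dg
  | _ => t

def solution (board : List (List Int)) (skill : List (List Int)) : Int :=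
  let N := board.length
  let M := (board.headD []).length   -- board[0]; Pre_ requires board ≠ []
  let temp0 := List.replicate (N + 1) (List.replicate (M + 1) (0 : Int))
  let t1 := skill.foldl applySkill temp0
  -- horizontal prefix pass: temp[i][j+1] += temp[i][j]
  let t2 := (List.range N).foldl (fun t i =>
      (List.range M).foldl (fun t j => bump2 t i (j + 1) (get2 t i j)) t) t1
  -- vertical prefix pass: temp[i+1][j] += temp[i][j]
  let t3 := (List.range M).foldl (fun t j =>
      (List.range N).foldl (fun t i => bump2 t (i + 1) j (get2 t i j)) t) t2
  -- final loop: board[i][j] += temp[i][j]; the value then tested is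
  -- board[i][j] + temp[i][j] (each cell is written and read exactly once)
  (List.range N).foldl (fun a i =>
    (List.range M).foldl (fun a j =>
      if get2 board i j + get2 t3 i j ≥ 1 then a + 1 else a) a) 0

-- ===== PORT B =====
-- one iteration of B's skill loop: add delta to every cell of the rectangle
def addRect (b : List (List Int)) (s : List Int) : List (List Int) :=
  match s with
  | [ty, r1, c1, r2, c2, dg] =>
    let delta := if ty = 1 then -dg else dg
    (PySem.List.pyRange r1 (r2 + 1) 1).foldl (fun bb i =>
      (PySem.List.pyRange c1 (c2 + 1) 1).foldl (fun bb2 j =>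
        bump2 bb2 i.toNat j.toNat delta) bb) b
  | _ => b

def solution_alt (board : List (List Int)) (skill : List (List Int)) : Int :=
  let N := board.length
  let M := (board.headD []).length   -- board[0]; Pre_ requires board ≠ []
  let fb := skill.foldl addRect board
  (List.range N).foldl (fun a i =>
    (List.range M).foldl (fun a j => if get2 fb i j ≥ 1 then a + 1 else a) a) 0

-- ===== PRECONDITION & SPEC =====
-- Pre_ restricts to well-formed inputs of the problem: a non-empty board whose
-- rows all have at least M = len(board[0]) cells, and skills that are 6-tuples
-- [type,r1,c1,r2,c2,degree] describing a rectangle with 0 ≤ r1 ≤ r2 < N and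
-- 0 ≤ c1 ≤ c2 < M.  Outside it A either raises (ValueError/IndexError) or — on
-- out-of-range or inverted rectangle coordinates, via Python's negative-index
-- wraparound and the difference array's leftover corner marks — returns
-- accidental values no one would specify, and B's values there are equally
-- accidental.
def Pre_solution (board : List (List Int)) (skill : List (List Int)) : Prop :=
  board ≠ [] ∧
  (∀ row ∈ board, (board.headD []).length ≤ row.length) ∧
  (∀ s ∈ skill, s.length = 6 ∧
     0 ≤ s.getD 1 0 ∧ s.getD 1 0 ≤ s.getD 3 0 ∧ s.getD 3 0 < (board.length : Int) ∧
     0 ≤ s.getD 2 0 ∧ s.getD 2 0 ≤ s.getD 4 0 ∧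
     s.getD 4 0 < ((board.headD []).length : Int))
instance (board : List (List Int)) (skill : List (List Int)) : Decidable (Pre_solution board skill) := by
  unfold Pre_solution; infer_instance

def pvWitness_solution : List (List Int) × List (List Int) :=
  ([[5, 5, 5], [5, 5, 5]], [[1, 0, 0, 1, 1, 5], [2, 0, 1, 1, 2, 2]])

def Spec_solution (board : List (List Int)) (skill : List (List Int)) (out : Int) : Prop := out = solution_alt board skill
instance (board : List (List Int)) (skill : List (List Int)) (out : Int) : Decidable (Spec_solution board skill out) := by unfold Spec_solution; infer_instance

-- ===== CLAIM (what is proved, stated in full; the proofs are below) =====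
def Claim_equal_solution : Prop := ∀ (board : List (List Int)) (skill : List (List Int)), Dom_solution board skill → Pre_solution board skill → Spec_solution board skill (solution board skill)


-- ===== LEMMAS AND PROOFS =====

-- grid shape: n rows, every row of length m
def Shape (g : List (List Int)) (n m : Nat) : Prop :=
  g.length = n ∧ ∀ a, a < n → m ≤ (g.getD a []).length

-- effective delta of a skill row
def dOf (s : List Int) : Int := if s.getD 0 0 = 1 then -(s.getD 5 0) else s.getD 5 0

-- the four-corner difference-array contribution of a skill at cell (a,b)
def cornerS (s : List Int) (a b : Nat) : Int :=
  (if a = (s.getD 1 0).toNat ∧ b = (s.getD 2 0).toNat then dOf s else 0)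
  + (if a = (s.getD 1 0).toNat ∧ b = (s.getD 4 0 + 1).toNat then -dOf s else 0)
  + (if a = (s.getD 3 0 + 1).toNat ∧ b = (s.getD 2 0).toNat then -dOf s else 0)
  + (if a = (s.getD 3 0 + 1).toNat ∧ b = (s.getD 4 0 + 1).toNat then dOf s else 0)

-- the rectangle contribution of a skill at cell (a,b)
def rectS (s : List Int) (a b : Nat) : Int :=
  if s.getD 1 0 ≤ (a : Int) ∧ (a : Int) ≤ s.getD 3 0 ∧
     s.getD 2 0 ≤ (b : Int) ∧ (b : Int) ≤ s.getD 4 0 then dOf s else 0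

def okSkill (N M : Nat) (s : List Int) : Prop :=
  s.length = 6 ∧ 0 ≤ s.getD 1 0 ∧ s.getD 1 0 ≤ s.getD 3 0 ∧ s.getD 3 0 < (N : Int) ∧
  0 ≤ s.getD 2 0 ∧ s.getD 2 0 ≤ s.getD 4 0 ∧ s.getD 4 0 < (M : Int)

theorem exists_six {s : List Int} (h : s.length = 6) :
    ∃ a b c d e f, s = [a, b, c, d, e, f] := by
  rcases s with _ | ⟨a, _ | ⟨b, _ | ⟨c, _ | ⟨d, _ | ⟨e, _ | ⟨f, _ | ⟨g, t⟩⟩⟩⟩⟩⟩⟩ <;>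
    simp_all

theorem getD_modify {α : Type} (l : List α) (i a : Nat) (f : α → α) (d : α)
    (ha : a < l.length) :
    (l.modify i f).getD a d = if i = a then f (l.getD a d) else l.getD a d := by
  rw [List.getD_eq_getElem?_getD, List.getD_eq_getElem?_getD, List.getElem?_modify,
    List.getElem?_eq_getElem ha]
  split <;> simp

theorem Shape_bump2 {g : List (List Int)} {n m : Nat} (h : Shape g n m)
    (i j : Nat) (d : Int) : Shape (bump2 g i j d) n m := by
  obtain ⟨hlen, hrow⟩ := h
  refine ⟨by simpa [bump2] using hlen, fun a ha => ?_⟩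
  rw [bump2, getD_modify _ _ _ _ _ (by omega)]
  split
  · simpa [List.length_modify] using hrow a ha
  · exact hrow a ha

theorem get2_bump2 {g : List (List Int)} {n m : Nat} (h : Shape g n m)
    {i j a b : Nat} (hi : i < n) (hj : j < m) (ha : a < n) (hb : b < m) (d : Int) :
    get2 (bump2 g i j d) a b = get2 g a b + if a = i ∧ b = j then d else 0 := by
  obtain ⟨hlen, hrow⟩ := h
  rw [get2, bump2, getD_modify _ _ _ _ _ (by omega)]
  by_cases hia : i = a
  · subst hia
    rw [if_pos rfl, getD_modify _ _ _ _ _ (by have := hrow i hi; omega), get2]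
    by_cases hjb : j = b
    · subst hjb; simp
    · rw [if_neg hjb, if_neg (by omega), add_zero]
  · simp only [get2, if_neg hia]
    rw [if_neg (by omega), add_zero]

theorem Shape_foldl {β : Type} {n m : Nat} (F : List (List Int) → β → List (List Int))
    (hF : ∀ g x, Shape g n m → Shape (F g x) n m) :
    ∀ (L : List β) (g : List (List Int)), Shape g n m → Shape (L.foldl F g) n m := by
  intro L
  induction L with
  | nil => intro g hg; exact hg
  | cons x L ih => intro g hg; exact ih _ (hF g x hg)

-- ---------- A, stage 1: the skill fold ----------

theorem Shape_applySkill {N M : Nat} {t : List (List Int)} (h : Shape t (N + 1) (M + 1))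
    (s : List Int) : Shape (applySkill t s) (N + 1) (M + 1) := by
  unfold applySkill
  split
  · exact Shape_bump2 (Shape_bump2 (Shape_bump2 (Shape_bump2 h _ _ _) _ _ _) _ _ _) _ _ _
  · exact h

theorem get2_applySkill {N M : Nat} {t : List (List Int)} (h : Shape t (N + 1) (M + 1))
    {s : List Int} (hs : okSkill N M s) {a b : Nat} (ha : a < N + 1) (hb : b < M + 1) :
    get2 (applySkill t s) a b = get2 t a b + cornerS s a b := by
  obtain ⟨ty, r1, c1, r2, c2, dg, rfl⟩ := exists_six hs.1
  obtain ⟨-, h1, h2, h3, h4, h5, h6⟩ := hs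
  simp at h1 h2 h3 h4 h5 h6
  simp only [applySkill]
  rw [get2_bump2 (Shape_bump2 (Shape_bump2 (Shape_bump2 h _ _ _) _ _ _) _ _ _)
      (by omega) (by omega) ha hb,
    get2_bump2 (Shape_bump2 (Shape_bump2 h _ _ _) _ _ _) (by omega) (by omega) ha hb,
    get2_bump2 (Shape_bump2 h _ _ _) (by omega) (by omega) ha hb,
    get2_bump2 h (by omega) (by omega) ha hb]
  simp [cornerS, dOf]
  split_ifs <;> omega

theorem get2_foldl_skill {N M : Nat} :
    ∀ (skills : List (List Int)) (t : List (List Int)), Shape t (N + 1) (M + 1) →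
    (∀ s ∈ skills, okSkill N M s) → ∀ {a b : Nat}, a < N + 1 → b < M + 1 →
    get2 (skills.foldl applySkill t) a b
      = get2 t a b + (skills.map (fun s => cornerS s a b)).sum := by
  intro skills
  induction skills with
  | nil => intro t _ _ a b _ _; simp
  | cons s skills ih =>
    intro t ht hok a b ha hb
    have hs := hok s (by simp)
    rw [List.foldl_cons, ih _ (Shape_applySkill ht s) (fun x hx => hok x (by simp [hx])) ha hb,
      get2_applySkill ht hs ha hb]
    simp [add_assoc]

-- ---------- A, stage 2: the two prefix-sum passes ----------

theorem get2_hrow {N M : Nat} {t : List (List Int)} (ht : Shape t (N + 1) (M + 1))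
    {i : Nat} (hi : i < N + 1) :
    ∀ (k : Nat), k ≤ M → ∀ {a b : Nat}, a < N + 1 → b < M + 1 →
    Shape ((List.range k).foldl (fun t j => bump2 t i (j + 1) (get2 t i j)) t) (N + 1) (M + 1) ∧
    get2 ((List.range k).foldl (fun t j => bump2 t i (j + 1) (get2 t i j)) t) a b
      = if a = i ∧ b ≤ k then ∑ b' ∈ Finset.range (b + 1), get2 t i b' else get2 t a b := by
  intro k
  induction k with
  | zero =>
    intro _ a b ha hb
    refine ⟨ht, ?_⟩
    simp only [List.range_zero, List.foldl_nil]
    split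
    · rename_i hc
      obtain ⟨rfl, hb0⟩ := hc
      have hb0' : b = 0 := by omega
      subst hb0'
      simp
    · rfl
  | succ k ih =>
    intro hk a b ha hb
    have hk' : k ≤ M := by omega
    have hsh : Shape ((List.range k).foldl (fun t j => bump2 t i (j + 1) (get2 t i j)) t)
        (N + 1) (M + 1) := (ih hk' ha hb).1
    rw [List.range_succ, List.foldl_append, List.foldl_cons, List.foldl_nil]
    refine ⟨Shape_bump2 hsh _ _ _, ?_⟩
    rw [get2_bump2 hsh hi (by omega) ha hb,
      (ih hk' ha hb).2, (ih hk' (a := i) (b := k) hi (by omega)).2]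
    by_cases hab : a = i ∧ b = k + 1
    · obtain ⟨rfl, rfl⟩ := hab
      rw [if_neg (by omega), if_pos ⟨rfl, rfl⟩, if_pos ⟨rfl, Nat.le_refl k⟩,
        if_pos ⟨rfl, by omega⟩, Finset.sum_range_succ]
      rw [Finset.sum_range_succ, Finset.sum_range_succ]
      ring
    · rw [if_neg hab, add_zero]
      by_cases h1 : a = i ∧ b ≤ k
      · rw [if_pos h1, if_pos ⟨h1.1, by omega⟩]
      · rw [if_neg h1, if_neg (by omega)]

theorem get2_hpass {N M : Nat} {t : List (List Int)} (ht : Shape t (N + 1) (M + 1)) :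
    ∀ (n : Nat), n ≤ N → ∀ {a b : Nat}, a < N + 1 → b < M + 1 →
    Shape ((List.range n).foldl (fun t i =>
        (List.range M).foldl (fun t j => bump2 t i (j + 1) (get2 t i j)) t) t) (N + 1) (M + 1) ∧
    get2 ((List.range n).foldl (fun t i =>
        (List.range M).foldl (fun t j => bump2 t i (j + 1) (get2 t i j)) t) t) a b
      = if a < n then ∑ b' ∈ Finset.range (b + 1), get2 t a b' else get2 t a b := by
  intro n
  induction n with
  | zero => intro _ a b ha hb; exact ⟨ht, by simp⟩
  | succ n ih =>
    intro hn a b ha hb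
    have hn' : n ≤ N := by omega
    have hsh := (ih hn' ha hb).1
    rw [List.range_succ, List.foldl_append, List.foldl_cons, List.foldl_nil]
    refine ⟨(get2_hrow hsh (by omega) M le_rfl ha hb).1, ?_⟩
    rw [(get2_hrow hsh (by omega) M le_rfl ha hb).2]
    by_cases hai : a = n
    · subst hai
      rw [if_pos ⟨rfl, by omega⟩, if_pos (by omega)]
      refine Finset.sum_congr rfl fun b' hb' => ?_
      rw [(ih hn' (a := a) (b := b') ha (by simp at hb'; omega)).2, if_neg (by omega)]
    · rw [if_neg (by simp [hai]), (ih hn' ha hb).2]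
      by_cases h1 : a < n
      · rw [if_pos h1, if_pos (by omega)]
      · rw [if_neg h1, if_neg (by omega)]

theorem get2_vcol {N M : Nat} {t : List (List Int)} (ht : Shape t (N + 1) (M + 1))
    {j : Nat} (hj : j < M + 1) :
    ∀ (k : Nat), k ≤ N → ∀ {a b : Nat}, a < N + 1 → b < M + 1 →
    Shape ((List.range k).foldl (fun t i => bump2 t (i + 1) j (get2 t i j)) t) (N + 1) (M + 1) ∧
    get2 ((List.range k).foldl (fun t i => bump2 t (i + 1) j (get2 t i j)) t) a b
      = if b = j ∧ a ≤ k then ∑ a' ∈ Finset.range (a + 1), get2 t a' j else get2 t a b := by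
  intro k
  induction k with
  | zero =>
    intro _ a b ha hb
    refine ⟨ht, ?_⟩
    simp only [List.range_zero, List.foldl_nil]
    split
    · rename_i hc
      obtain ⟨rfl, ha0⟩ := hc
      have ha0' : a = 0 := by omega
      subst ha0'
      simp
    · rfl
  | succ k ih =>
    intro hk a b ha hb
    have hk' : k ≤ N := by omega
    have hsh := (ih hk' ha hb).1
    rw [List.range_succ, List.foldl_append, List.foldl_cons, List.foldl_nil]
    refine ⟨Shape_bump2 hsh _ _ _, ?_⟩
    rw [get2_bump2 hsh (by omega) hj ha hb,
      (ih hk' ha hb).2, (ih hk' (a := k) (b := j) (by omega) hj).2]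
    by_cases hab : b = j ∧ a = k + 1
    · obtain ⟨rfl, rfl⟩ := hab
      rw [if_neg (by omega), if_pos ⟨rfl, rfl⟩, if_pos ⟨rfl, Nat.le_refl k⟩,
        if_pos ⟨rfl, by omega⟩, Finset.sum_range_succ]
      rw [Finset.sum_range_succ, Finset.sum_range_succ]
      ring
    · rw [if_neg (show ¬(a = k + 1 ∧ b = j) from by omega), add_zero]
      by_cases h1 : b = j ∧ a ≤ k
      · rw [if_pos h1, if_pos ⟨h1.1, by omega⟩]
      · rw [if_neg h1, if_neg (by omega)]

theorem get2_vpass {N M : Nat} {t : List (List Int)} (ht : Shape t (N + 1) (M + 1)) :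
    ∀ (n : Nat), n ≤ M → ∀ {a b : Nat}, a < N + 1 → b < M + 1 →
    Shape ((List.range n).foldl (fun t j =>
        (List.range N).foldl (fun t i => bump2 t (i + 1) j (get2 t i j)) t) t) (N + 1) (M + 1) ∧
    get2 ((List.range n).foldl (fun t j =>
        (List.range N).foldl (fun t i => bump2 t (i + 1) j (get2 t i j)) t) t) a b
      = if b < n then ∑ a' ∈ Finset.range (a + 1), get2 t a' b else get2 t a b := by
  intro n
  induction n with
  | zero => intro _ a b ha hb; exact ⟨ht, by simp⟩
  | succ n ih =>
    intro hn a b ha hb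
    have hn' : n ≤ M := by omega
    have hsh := (ih hn' ha hb).1
    rw [List.range_succ, List.foldl_append, List.foldl_cons, List.foldl_nil]
    refine ⟨(get2_vcol hsh (by omega) N le_rfl ha hb).1, ?_⟩
    rw [(get2_vcol hsh (by omega) N le_rfl ha hb).2]
    by_cases hbj : b = n
    · subst hbj
      rw [if_pos ⟨rfl, by omega⟩, if_pos (by omega)]
      refine Finset.sum_congr rfl fun a' ha' => ?_
      rw [(ih hn' (a := a') (b := b) (by simp at ha'; omega) hb).2, if_neg (by omega)]
    · rw [if_neg (by simp [hbj]), (ih hn' ha hb).2]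
      by_cases h1 : b < n
      · rw [if_pos h1, if_pos (by omega)]
      · rw [if_neg h1, if_neg (by omega)]

-- ---------- corner/rect summation ----------

theorem sum_sum_ite_eq (a b x y : Nat) (c : Int) :
    (∑ a' ∈ Finset.range (a + 1), ∑ b' ∈ Finset.range (b + 1),
      if a' = x ∧ b' = y then c else 0) = if x ≤ a ∧ y ≤ b then c else 0 := by
  have inner : ∀ a', (∑ b' ∈ Finset.range (b + 1), if a' = x ∧ b' = y then c else 0)
      = if a' = x then (if y ≤ b then c else 0) else 0 := by
    intro a'
    by_cases hx : a' = x
    · simp [hx, Finset.sum_ite_eq']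
    · simp [hx]
  rw [Finset.sum_congr rfl fun a' _ => inner a', Finset.sum_ite_eq']
  simp [ite_and]

theorem sum_sum_cornerS {N M : Nat} {s : List Int} (hs : okSkill N M s)
    {a b : Nat} (ha : a < N) (hb : b < M) :
    (∑ a' ∈ Finset.range (a + 1), ∑ b' ∈ Finset.range (b + 1), cornerS s a' b')
      = rectS s a b := by
  obtain ⟨ty, r1, c1, r2, c2, dg, rfl⟩ := exists_six hs.1
  obtain ⟨-, h1, h2, h3, h4, h5, h6⟩ := hs
  simp at h1 h2 h3 h4 h5 h6
  simp [cornerS, rectS, dOf]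
  simp only [Finset.sum_add_distrib, sum_sum_ite_eq]
  split_ifs <;> omega

theorem sum_exchange (l : List (List Int)) (f : List Int → Nat → Int) (n : Nat) :
    (∑ x ∈ Finset.range n, (l.map (fun s => f s x)).sum)
      = (l.map (fun s => ∑ x ∈ Finset.range n, f s x)).sum := by
  induction l with
  | nil => simp
  | cons s l ih => simp [Finset.sum_add_distrib, ih]

-- ---------- B: rectangle updates ----------

theorem get2_colFold {N M : Nat} {i : Int} (hi0 : 0 ≤ i) (hiN : i < (N : Int))
    {c2 : Int} (hc2 : c2 < (M : Int)) (δ : Int) :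
    ∀ (fuel : Nat) (c : Int), (c2 + 1 - c).toNat ≤ fuel → 0 ≤ c →
    ∀ (g : List (List Int)), Shape g N M → ∀ {a b : Nat}, a < N → b < M →
    Shape ((PySem.List.pyRange c (c2 + 1) 1).foldl
        (fun bb2 j => bump2 bb2 i.toNat j.toNat δ) g) N M ∧
    get2 ((PySem.List.pyRange c (c2 + 1) 1).foldl
        (fun bb2 j => bump2 bb2 i.toNat j.toNat δ) g) a b
      = get2 g a b + (if (a : Int) = i ∧ c ≤ (b : Int) ∧ (b : Int) ≤ c2 then δ else 0) := by
  intro fuel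
  induction fuel with
  | zero =>
    intro c hfuel hc g hg a b ha hb
    rw [PySem.List.pyRange_one_eq_nil (by omega)]
    refine ⟨hg, ?_⟩
    rw [if_neg (by omega), add_zero, List.foldl_nil]
  | succ fuel ih =>
    intro c hfuel hc g hg a b ha hb
    by_cases hlt : c < c2 + 1
    · rw [PySem.List.pyRange_one_cons hlt, List.foldl_cons]
      have hg' := Shape_bump2 hg i.toNat c.toNat δ
      obtain ⟨hsh, hval⟩ := ih (c + 1) (by omega) (by omega) _ hg' ha hb
      refine ⟨hsh, ?_⟩
      rw [hval, get2_bump2 hg (by omega) (by omega) ha hb]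
      split_ifs <;> omega
    · rw [PySem.List.pyRange_one_eq_nil (by omega), List.foldl_nil]
      exact ⟨hg, by rw [if_neg (by omega), add_zero]⟩

theorem get2_rowFold {N M : Nat} {c1 c2 : Int} (hc1 : 0 ≤ c1) (hc2 : c2 < (M : Int))
    {r2 : Int} (hr2 : r2 < (N : Int)) (δ : Int) :
    ∀ (fuel : Nat) (r : Int), (r2 + 1 - r).toNat ≤ fuel → 0 ≤ r →
    ∀ (g : List (List Int)), Shape g N M → ∀ {a b : Nat}, a < N → b < M →
    Shape ((PySem.List.pyRange r (r2 + 1) 1).foldl (fun bb i =>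
        (PySem.List.pyRange c1 (c2 + 1) 1).foldl
          (fun bb2 j => bump2 bb2 i.toNat j.toNat δ) bb) g) N M ∧
    get2 ((PySem.List.pyRange r (r2 + 1) 1).foldl (fun bb i =>
        (PySem.List.pyRange c1 (c2 + 1) 1).foldl
          (fun bb2 j => bump2 bb2 i.toNat j.toNat δ) bb) g) a b
      = get2 g a b + (if r ≤ (a : Int) ∧ (a : Int) ≤ r2 ∧ c1 ≤ (b : Int) ∧ (b : Int) ≤ c2
          then δ else 0) := by
  intro fuel
  induction fuel with
  | zero =>
    intro r hfuel hr g hg a b ha hb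
    rw [show PySem.List.pyRange r (r2 + 1) 1 = [] from PySem.List.pyRange_one_eq_nil (by omega)]
    exact ⟨hg, by rw [if_neg (by omega), add_zero, List.foldl_nil]⟩
  | succ fuel ih =>
    intro r hfuel hr g hg a b ha hb
    by_cases hlt : r < r2 + 1
    · rw [show PySem.List.pyRange r (r2 + 1) 1 = r :: PySem.List.pyRange (r + 1) (r2 + 1) 1
          from PySem.List.pyRange_one_cons hlt, List.foldl_cons]
      obtain ⟨hg', hval'⟩ := get2_colFold (N := N) (M := M) (i := r) hr (by omega) hc2 δ
        ((c2 + 1 - c1).toNat) c1 le_rfl hc1 g hg ha hb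
      obtain ⟨hsh, hval⟩ := ih (r + 1) (by omega) (by omega) _ hg' ha hb
      refine ⟨hsh, ?_⟩
      rw [hval, hval']
      split_ifs <;> omega
    · rw [show PySem.List.pyRange r (r2 + 1) 1 = [] from PySem.List.pyRange_one_eq_nil (by omega),
        List.foldl_nil]
      exact ⟨hg, by rw [if_neg (by omega), add_zero]⟩

theorem get2_addRect {N M : Nat} {g : List (List Int)} (hg : Shape g N M)
    {s : List Int} (hs : okSkill N M s) {a b : Nat} (ha : a < N) (hb : b < M) :
    Shape (addRect g s) N M ∧ get2 (addRect g s) a b = get2 g a b + rectS s a b := by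
  obtain ⟨ty, r1, c1, r2, c2, dg, rfl⟩ := exists_six hs.1
  obtain ⟨-, h1, h2, h3, h4, h5, h6⟩ := hs
  simp at h1 h2 h3 h4 h5 h6
  simp only [addRect]
  simp only [rectS, dOf]
  simp only [List.getD_cons_zero, List.getD_cons_succ]
  exact get2_rowFold h4 h6 h3 _ ((r2 + 1 - r1).toNat) r1 le_rfl h1 g hg ha hb

theorem get2_foldl_addRect {N M : Nat} :
    ∀ (skills : List (List Int)) (g : List (List Int)), Shape g N M →
    (∀ s ∈ skills, okSkill N M s) → ∀ {a b : Nat}, a < N → b < M →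
    Shape (skills.foldl addRect g) N M ∧
    get2 (skills.foldl addRect g) a b
      = get2 g a b + (skills.map (fun s => rectS s a b)).sum := by
  intro skills
  induction skills with
  | nil => intro g hg _ a b _ _; exact ⟨hg, by simp⟩
  | cons s skills ih =>
    intro g hg hok a b ha hb
    have hstep := get2_addRect hg (hok s (by simp)) ha hb
    obtain ⟨hsh, hval⟩ := ih _ hstep.1 (fun x hx => hok x (by simp [hx])) ha hb
    refine ⟨hsh, ?_⟩
    rw [List.foldl_cons, hval, hstep.2]
    simp [add_assoc]

-- ---------- counting ----------

theorem count_inner (P : Nat → Prop) [DecidablePred P] :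
    ∀ (m : Nat) (A : Int), (List.range m).foldl (fun a j => if P j then a + 1 else a) A
      = A + ∑ j ∈ Finset.range m, (if P j then (1 : Int) else 0) := by
  intro m
  induction m with
  | zero => intro A; simp
  | succ m ih =>
    intro A
    rw [List.range_succ, List.foldl_append, List.foldl_cons, List.foldl_nil, ih,
      Finset.sum_range_succ]
    split_ifs <;> ring

theorem count_outer (P : Nat → Nat → Prop) [∀ i j, Decidable (P i j)] (N M : Nat) :
    (List.range N).foldl (fun a i =>
        (List.range M).foldl (fun a j => if P i j then a + 1 else a) a) 0
      = ∑ i ∈ Finset.range N, ∑ j ∈ Finset.range M, (if P i j then (1 : Int) else 0) := by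
  suffices h : ∀ (n : Nat) (A : Int), (List.range n).foldl (fun a i =>
      (List.range M).foldl (fun a j => if P i j then a + 1 else a) a) A
      = A + ∑ i ∈ Finset.range n, ∑ j ∈ Finset.range M, (if P i j then (1 : Int) else 0) by
    rw [h N 0, zero_add]
  intro n
  induction n with
  | zero => intro A; simp
  | succ n ih =>
    intro A
    rw [List.range_succ, List.foldl_append, List.foldl_cons, List.foldl_nil, ih,
      count_inner, Finset.sum_range_succ, add_assoc]

theorem countA (V : Nat → Nat → Int) (N M : Nat) :
    (List.range N).foldl (fun a i =>
        (List.range M).foldl (fun a j => if V i j ≥ 1 then a + 1 else a) a) 0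
      = ∑ i ∈ Finset.range N, ∑ j ∈ Finset.range M, (if V i j ≥ 1 then (1 : Int) else 0) :=
  count_outer (fun i j => V i j ≥ 1) N M

-- ---------- assembly ----------

theorem solution_eq_alt (board skill : List (List Int)) (h : Pre_solution board skill) :
    solution board skill = solution_alt board skill := by
  obtain ⟨hne, hrect, hsk⟩ := h
  simp only [solution, solution_alt]
  set N := board.length with hN
  set M := (board.headD []).length with hM
  set temp0 := List.replicate (N + 1) (List.replicate (M + 1) (0 : Int)) with htemp0
  set t1 := skill.foldl applySkill temp0 with ht1
  set t2 := (List.range N).foldl (fun t i =>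
      (List.range M).foldl (fun t j => bump2 t i (j + 1) (get2 t i j)) t) t1 with ht2
  set t3 := (List.range M).foldl (fun t j =>
      (List.range N).foldl (fun t i => bump2 t (i + 1) j (get2 t i j)) t) t2 with ht3
  set fb := skill.foldl addRect board with hfb
  have hok : ∀ s ∈ skill, okSkill N M s := fun s hs => hsk s hs
  have hShape : Shape board N M := ⟨rfl, fun a ha => by
    rw [List.getD_eq_getElem?_getD, List.getElem?_eq_getElem ha]
    exact hrect _ (List.getElem_mem ha)⟩
  have hT0 : Shape temp0 (N + 1) (M + 1) :=
    ⟨List.length_replicate, fun a ha => by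
      rw [htemp0, List.getD_replicate _ ha, List.length_replicate]⟩
  have hT0v : ∀ a b : Nat, a < N + 1 → b < M + 1 → get2 temp0 a b = 0 := fun a b ha hb => by
    rw [htemp0, get2, List.getD_replicate _ ha, List.getD_replicate _ hb]
  have hT1s : Shape t1 (N + 1) (M + 1) :=
    Shape_foldl applySkill (fun g s hg => Shape_applySkill hg s) skill temp0 hT0
  have hT1 : ∀ a b : Nat, a < N + 1 → b < M + 1 →
      get2 t1 a b = (skill.map (fun s => cornerS s a b)).sum := fun a b ha hb => by
    rw [ht1, get2_foldl_skill skill temp0 hT0 hok ha hb, hT0v a b ha hb, zero_add]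
  have hT2s : Shape t2 (N + 1) (M + 1) :=
    (get2_hpass hT1s N le_rfl (a := 0) (b := 0) (by omega) (by omega)).1
  have hT2 : ∀ a b : Nat, a < N → b < M + 1 →
      get2 t2 a b = ∑ b' ∈ Finset.range (b + 1), get2 t1 a b' := fun a b ha hb => by
    rw [ht2, (get2_hpass hT1s N le_rfl (by omega) hb).2, if_pos ha]
  have hT3 : ∀ a b : Nat, a < N + 1 → b < M →
      get2 t3 a b = ∑ a' ∈ Finset.range (a + 1), get2 t2 a' b := fun a b ha hb => by
    rw [ht3, (get2_vpass hT2s M le_rfl ha (by omega)).2, if_pos hb]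
  have hA : ∀ i j : Nat, i < N → j < M →
      get2 t3 i j = (skill.map (fun s => rectS s i j)).sum := by
    intro i j hi hj
    calc get2 t3 i j = ∑ a' ∈ Finset.range (i + 1), get2 t2 a' j :=
          hT3 i j (by omega) hj
      _ = ∑ a' ∈ Finset.range (i + 1), ∑ b' ∈ Finset.range (j + 1), get2 t1 a' b' :=
          Finset.sum_congr rfl fun a' ha' =>
            hT2 a' j (by simp only [Finset.mem_range] at ha'; omega) (by omega)
      _ = ∑ a' ∈ Finset.range (i + 1), ∑ b' ∈ Finset.range (j + 1),
            (skill.map (fun s => cornerS s a' b')).sum :=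
          Finset.sum_congr rfl fun a' ha' => Finset.sum_congr rfl fun b' hb' =>
            hT1 a' b' (by simp only [Finset.mem_range] at ha'; omega)
              (by simp only [Finset.mem_range] at hb'; omega)
      _ = ∑ a' ∈ Finset.range (i + 1),
            (skill.map (fun s => ∑ b' ∈ Finset.range (j + 1), cornerS s a' b')).sum :=
          Finset.sum_congr rfl fun a' _ =>
            sum_exchange skill (fun s b' => cornerS s a' b') (j + 1)
      _ = (skill.map (fun s => ∑ a' ∈ Finset.range (i + 1),
            ∑ b' ∈ Finset.range (j + 1), cornerS s a' b')).sum :=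
          sum_exchange skill (fun s a' => ∑ b' ∈ Finset.range (j + 1), cornerS s a' b') (i + 1)
      _ = (skill.map (fun s => rectS s i j)).sum :=
          congrArg List.sum (List.map_congr_left fun s hs => sum_sum_cornerS (hok s hs) hi hj)
  rw [countA (fun i j => get2 board i j + get2 t3 i j) N M,
    countA (fun i j => get2 fb i j) N M]
  refine Finset.sum_congr rfl fun i hi => Finset.sum_congr rfl fun j hj => ?_
  have hi' : i < N := by simpa using hi
  have hj' : j < M := by simpa using hj
  rw [hfb, (get2_foldl_addRect skill board hShape hok hi' hj').2, hA i j hi' hj']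

-- ===== VERDICT (by name: the statement is the Claim_ definition above) =====
theorem solution_spec : Claim_equal_solution := by
  intro board skill _ hpre
  exact solution_eq_alt board skill hpre
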